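-- pv_equiv track=rewrite | github.com/joaopalet/bedocu | lang_chain_demo/list_of_pics.py | combine_ascii_images_centered_list
-- ===== SOURCE A (Python) =====
-- def combine_ascii_images_centered_list(ascii_images, spacing=8):
--     # Split each image into lines
--     split_images = [img.split('\n') for img in ascii_images]
--     max_height = max(len(img) for img in split_images)
--
--     # Calculate the max width for each image to ensure consistent padding
--     max_widths = [max(len(line) for line in img) for img in split_images]
--
--     # Center each image vertically and ensure each line has uniform width
--     centered_images = []
--     for img, max_width in zip(split_images, max_widths):
--         top_padding = (max_height - len(img)) // 2
--         bottom_padding = max_height - len(img) - top_padding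
--         padded_img = [' ' * max_width for _ in range(top_padding)] + \
--                      [line.ljust(max_width) for line in img] + \
--                      [' ' * max_width for _ in range(bottom_padding)]
--         centered_images.append(padded_img)
--
--     # Combine the images side by side with specified spacing
--     combined_lines = []
--     for i in range(max_height):
--         combined_line = (' ' * spacing).join(centered_images[j][i] for j in range(len(centered_images)))
--         combined_lines.append(combined_line)
--
--     return '\n'.join(combined_lines)
-- ===== SOURCE B (Python) =====
-- def combine_ascii_images_centered_list(ascii_images, spacing=8):
--     # Row-major single pass: compute each output row's cells on the fly
--     # instead of materializing the padded/centered grid.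
--     split_images = [img.split('\n') for img in ascii_images]
--     max_height = max(len(img) for img in split_images)
--     sep = ' ' * spacing
--     pieces = [(img, max(len(line) for line in img)) for img in split_images]
--     rows = []
--     for i in range(max_height):
--         cells = []
--         for img, w in pieces:
--             top = (max_height - len(img)) // 2
--             if top <= i < top + len(img):
--                 cells.append(img[i - top].ljust(w))
--             else:
--                 cells.append(' ' * w)
--         rows.append(sep.join(cells))
--     return '\n'.join(rows)
-- ===== Notes on version B (the rewrite author's own statement) =====
-- stated objective: alternative
-- what changed: B drops A's materialized centered grid (padded list-of-lists plus column indexing): after computing max_height and per-image widths, it emits the output row by row, deciding each cell's vertical-band membership arithmetically on the fly.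
import Mathlib
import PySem

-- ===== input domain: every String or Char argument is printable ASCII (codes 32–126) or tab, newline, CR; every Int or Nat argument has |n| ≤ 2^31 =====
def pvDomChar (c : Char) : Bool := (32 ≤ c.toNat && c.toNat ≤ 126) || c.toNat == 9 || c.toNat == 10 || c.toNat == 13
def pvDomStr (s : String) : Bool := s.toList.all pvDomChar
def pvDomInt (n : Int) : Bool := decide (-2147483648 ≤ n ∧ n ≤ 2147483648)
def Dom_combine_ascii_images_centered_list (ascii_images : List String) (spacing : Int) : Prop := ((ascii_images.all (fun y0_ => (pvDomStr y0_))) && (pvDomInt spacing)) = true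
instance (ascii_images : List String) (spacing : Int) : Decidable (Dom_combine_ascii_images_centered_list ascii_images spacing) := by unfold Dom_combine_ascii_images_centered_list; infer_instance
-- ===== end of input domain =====

-- B fuses A's grid construction into one row-major pass (computes each cell's band membership
-- on the fly instead of materializing the centered grid); same cost, no intermediate grid.

-- shared helpers (both Pythons use the same built-ins)
-- Python max(<nonempty>); raises ValueError on [] — Pre_ excludes the empty image list
def pyMaxNat (xs : List Nat) : Nat :=
  match xs with
  | [] => 0
  | h :: t => t.foldl max h

-- img.split('\n'): sep is non-empty so split? is never none; exact
def splitNL (img : String) : List String := (PySem.Str.split? img "\n").getD []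

-- ' ' * w
def spacesStr (w : Nat) : String := String.ofList (List.replicate w ' ')

-- s.ljust(w): pads with max(0, w - len s) spaces — exact (Nat subtraction truncates like Python's max)
def ljustStr (s : String) (w : Nat) : String :=
  String.ofList (s.toList ++ List.replicate (w - s.toList.length) ' ')

-- ===== PORT A =====
def combine_ascii_images_centered_list (ascii_images : List String) (spacing : Int) : String :=
  let split_images := ascii_images.map (fun img => splitNL img)
  let max_height := pyMaxNat (split_images.map (fun img => img.length))
  let max_widths := split_images.map (fun img => pyMaxNat (img.map (fun line => line.toList.length)))
  let centered_images := (split_images.zip max_widths).map (fun p =>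
    let top_padding := (max_height - p.1.length) / 2            -- nonneg ints: Python // = Nat /
    let bottom_padding := max_height - p.1.length - top_padding
    List.replicate top_padding (spacesStr p.2)
      ++ p.1.map (fun line => ljustStr line p.2)
      ++ List.replicate bottom_padding (spacesStr p.2))
  let combined_lines := (List.range max_height).map (fun i =>
    PySem.Str.join (String.ofList (PySem.List.pyRepeat [' '] spacing))
      ((List.range centered_images.length).map (fun j =>
        -- centered_images[j][i]: indices provably in range, getD never hits the default
        (centered_images.getD j []).getD i "")))
  PySem.Str.join "\n" combined_lines

-- ===== PORT B =====
def combine_ascii_images_centered_list_alt (ascii_images : List String) (spacing : Int) : String :=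
  let split_images := ascii_images.map (fun img => splitNL img)
  let max_height := pyMaxNat (split_images.map (fun img => img.length))
  let sep := String.ofList (PySem.List.pyRepeat [' '] spacing)
  let pieces := split_images.map (fun img => (img, pyMaxNat (img.map (fun line => line.toList.length))))
  let rows := (List.range max_height).map (fun i =>
    PySem.Str.join sep (pieces.map (fun p =>
      let top := (max_height - p.1.length) / 2
      if top ≤ i ∧ i < top + p.1.length then ljustStr (p.1.getD (i - top) "") p.2
      else spacesStr p.2)))
  PySem.Str.join "\n" rows

-- ===== PRECONDITION & SPEC =====
-- Python A raises ValueError (max of empty sequence) on the empty image list; excluded.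
def Pre_combine_ascii_images_centered_list (ascii_images : List String) (spacing : Int) : Prop :=
  ascii_images ≠ []
instance (ascii_images : List String) (spacing : Int) : Decidable (Pre_combine_ascii_images_centered_list ascii_images spacing) := by unfold Pre_combine_ascii_images_centered_list; infer_instance
def pvWitness_combine_ascii_images_centered_list : List String × Int := (["ab\nc", "x"], 2)

def Spec_combine_ascii_images_centered_list (ascii_images : List String) (spacing : Int) (out : String) : Prop := out = combine_ascii_images_centered_list_alt ascii_images spacing
instance (ascii_images : List String) (spacing : Int) (out : String) : Decidable (Spec_combine_ascii_images_centered_list ascii_images spacing out) := by unfold Spec_combine_ascii_images_centered_list; infer_instance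

-- ===== CLAIM (what is proved, stated in full; the proofs are below) =====
def Claim_equal_combine_ascii_images_centered_list : Prop := ∀ (ascii_images : List String) (spacing : Int), Dom_combine_ascii_images_centered_list ascii_images spacing → Pre_combine_ascii_images_centered_list ascii_images spacing → Spec_combine_ascii_images_centered_list ascii_images spacing (combine_ascii_images_centered_list ascii_images spacing)

-- ===== LEMMAS AND PROOFS =====

theorem le_pyMaxNat (xs : List Nat) (x : Nat) (hx : x ∈ xs) : x ≤ pyMaxNat xs := by
  match xs with
  | [] => cases hx
  | h :: t =>
    have h' := PySem.List.le_foldl_max_nat t (fun y => y) h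
    rcases List.mem_cons.mp hx with rfl | hx
    · exact h'.1
    · exact h'.2 x hx

-- cell access into A's padded column
theorem pad_getD (t b : Nat) (pad d : String) (ys : List String) (i : Nat)
    (hi : i < t + ys.length + b) :
    (List.replicate t pad ++ ys ++ List.replicate b pad).getD i d
      = if t ≤ i ∧ i < t + ys.length then ys.getD (i - t) d else pad := by
  rcases Nat.lt_or_ge i t with h1 | h1
  · rw [List.getD_eq_getElem _ _ (by simp; omega), if_neg (by omega)]
    rw [List.getElem_append_left (by simp; omega),
        List.getElem_append_left (by simp; omega)]
    simp
  · rcases Nat.lt_or_ge i (t + ys.length) with h2 | h2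
    · rw [List.getD_eq_getElem _ _ (by simp; omega), if_pos ⟨h1, h2⟩,
        List.getD_eq_getElem _ _ (by omega)]
      rw [List.getElem_append_left (by simp; omega)]
      rw [List.getElem_append_right (by simp; omega)]
      simp
    · rw [List.getD_eq_getElem _ _ (by simp; omega), if_neg (by omega)]
      rw [List.getElem_append_right (by simp; omega)]
      simp

-- l paired with a projection of itself is a single map
theorem zip_self_map {α β : Type} (l : List α) (g : α → β) :
    l.zip (l.map g) = l.map (fun a => (a, g a)) := by
  induction l with
  | nil => rfl
  | cons h t ih => simp [ih]

-- ===== VERDICT (by name: the statement is the Claim_ definition above) =====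
theorem combine_ascii_images_centered_list_spec : Claim_equal_combine_ascii_images_centered_list := by
  intro ascii_images spacing _ _
  unfold Spec_combine_ascii_images_centered_list
  unfold combine_ascii_images_centered_list combine_ascii_images_centered_list_alt
  dsimp only
  set split := ascii_images.map (fun img => splitNL img) with hsplit
  rw [zip_self_map]
  set H := pyMaxNat (split.map (fun img => img.length)) with hH
  simp only [List.map_map]
  apply congrArg
  apply List.map_congr_left
  intro i hi
  rw [List.mem_range] at hi
  apply congrArg
  apply List.ext_getElem
  · simp
  · intro k hk1 hk2
    simp only [List.length_map, List.length_range] at hk1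
    simp only [List.getElem_map, List.getElem_range, Function.comp_apply]
    have hmem : split[k] ∈ split := List.getElem_mem hk1
    have hlen : split[k].length ≤ H := le_pyMaxNat _ _ (List.mem_map_of_mem hmem)
    have htop : (H - split[k].length) / 2 ≤ H - split[k].length := Nat.div_le_self _ _
    have hC : ∀ (f : List String → List String), ((split.map f).getD k []) = f split[k] :=
      fun f => by rw [List.getD_eq_getElem _ _ (by simpa using hk1), List.getElem_map]
    rw [hC]
    simp only [Function.comp_apply]
    rw [pad_getD _ _ _ _ _ _ (by simp only [List.length_map]; omega)]
    simp only [List.length_map]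
    split_ifs with hband
    · rw [List.getD_eq_getElem _ _ (by simp only [List.length_map]; omega), List.getElem_map,
          List.getD_eq_getElem _ _ (by omega)]
    · rfl
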